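-- pv_equiv track=rewrite | github.com/luckyit-test/ai-research | company_valuation/collectors/tech_stack.py | _calculate_tech_score
-- ===== SOURCE A (Python) =====
-- def _calculate_tech_score(techs: dict) -> int:
--     """Calculate technology sophistication score (0-100)."""
--     score = 0
--
--     # Modern frontend framework
--     if any(t in techs for t in ["react", "vue", "angular", "svelte", "next.js"]):
--         score += 20
--
--     # Cloud infrastructure
--     if any(t in techs for t in ["aws", "google cloud", "azure", "vercel"]):
--         score += 15
--
--     # CDN usage
--     if any(t in techs for t in ["cloudflare", "fastly", "akamai", "cloudfront"]):
--         score += 10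
--
--     # Analytics
--     if any(t in techs for t in ["google analytics", "mixpanel", "amplitude", "segment"]):
--         score += 10
--
--     # Professional payments
--     if "stripe" in techs:
--         score += 10
--
--     # Customer support tools
--     if any(t in techs for t in ["intercom", "zendesk", "drift"]):
--         score += 10
--
--     # Monitoring
--     if any(t in techs for t in ["sentry", "datadog"]):
--         score += 10
--
--     # Marketing automation
--     if any(t in techs for t in ["hubspot", "segment"]):
--         score += 10
--
--     # Not using basic CMS (WordPress without customization)
--     if "wordpress" not in techs and "wix" not in techs:
--         score += 5
--
--     return min(score, 100)
-- ===== SOURCE B (Python) =====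
-- # B: inverted index — one pass over the techs, OR-ing per-tech rule bitmasks,
-- # then decode the fired-rule bitmask into points (bit 8 = CMS present).
-- _MASK = {
--     "react": 1, "vue": 1, "angular": 1, "svelte": 1, "next.js": 1,
--     "aws": 2, "google cloud": 2, "azure": 2, "vercel": 2,
--     "cloudflare": 4, "fastly": 4, "akamai": 4, "cloudfront": 4,
--     "google analytics": 8, "mixpanel": 8, "amplitude": 8, "segment": 136,
--     "stripe": 16,
--     "intercom": 32, "zendesk": 32, "drift": 32,
--     "sentry": 64, "datadog": 64,
--     "hubspot": 128,
--     "wordpress": 256, "wix": 256,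
-- }
-- _POINTS = (20, 15, 10, 10, 10, 10, 10, 10)
--
-- def _calculate_tech_score(techs: dict) -> int:
--     fired = 0
--     for t in techs:
--         fired |= _MASK.get(t, 0)
--     score = sum(p for i, p in enumerate(_POINTS) if fired >> i & 1)
--     if not fired >> 8 & 1:
--         score += 5
--     return min(score, 100)
-- ===== Notes on version B (the rewrite author's own statement) =====
-- stated objective: alternative
-- what changed: Replaced the nine per-rule membership scans by an inverted index: one pass over the techs OR-ing per-tech rule bitmasks from a precomputed tech->bitmask dict, then a decode of the fired-rule bitmask into points (bit 8 = CMS present, negated for the +5 bonus).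
import Mathlib
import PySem

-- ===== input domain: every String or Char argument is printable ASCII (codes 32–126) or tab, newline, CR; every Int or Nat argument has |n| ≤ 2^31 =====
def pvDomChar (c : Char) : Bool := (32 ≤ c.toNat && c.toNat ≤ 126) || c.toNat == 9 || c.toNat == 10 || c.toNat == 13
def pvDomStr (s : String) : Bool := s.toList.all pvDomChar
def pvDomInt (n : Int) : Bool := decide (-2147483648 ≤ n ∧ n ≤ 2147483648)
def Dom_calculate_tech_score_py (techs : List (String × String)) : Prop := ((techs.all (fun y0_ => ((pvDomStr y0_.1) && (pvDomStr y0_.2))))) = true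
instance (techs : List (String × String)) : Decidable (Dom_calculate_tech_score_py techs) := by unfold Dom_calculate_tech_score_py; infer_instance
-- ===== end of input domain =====

-- B replaces A's nine per-rule membership scans by a single pass OR-ing per-tech rule
-- bitmasks (an inverted index) followed by a bitmask decode (objective: alternative).


-- ===== PORT A =====
-- "t in techs" on a Python dict is key membership; ported as a first-component scan.
def pyHasKey (techs : List (String × String)) (t : String) : Bool :=
  techs.any (fun p => p.1 == t)

-- Literal transliteration of A: nine sequential conditional additions, then min(score, 100).
def calculate_tech_score_py (techs : List (String × String)) : Int :=
  let score : Int := 0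
  let score := if (["react", "vue", "angular", "svelte", "next.js"].any (fun t => pyHasKey techs t)) then score + 20 else score
  let score := if (["aws", "google cloud", "azure", "vercel"].any (fun t => pyHasKey techs t)) then score + 15 else score
  let score := if (["cloudflare", "fastly", "akamai", "cloudfront"].any (fun t => pyHasKey techs t)) then score + 10 else score
  let score := if (["google analytics", "mixpanel", "amplitude", "segment"].any (fun t => pyHasKey techs t)) then score + 10 else score
  let score := if pyHasKey techs "stripe" then score + 10 else score
  let score := if (["intercom", "zendesk", "drift"].any (fun t => pyHasKey techs t)) then score + 10 else score
  let score := if (["sentry", "datadog"].any (fun t => pyHasKey techs t)) then score + 10 else score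
  let score := if (["hubspot", "segment"].any (fun t => pyHasKey techs t)) then score + 10 else score
  let score := if (!pyHasKey techs "wordpress" && !pyHasKey techs "wix") then score + 5 else score
  min score 100

-- ===== PORT B =====
-- B's tech -> rule-bitmask dict (the values are nonnegative small ints, so Nat is exact).
def pvMaskL : List (String × Nat) :=
  [ ("react", 1), ("vue", 1), ("angular", 1), ("svelte", 1), ("next.js", 1),
    ("aws", 2), ("google cloud", 2), ("azure", 2), ("vercel", 2),
    ("cloudflare", 4), ("fastly", 4), ("akamai", 4), ("cloudfront", 4),
    ("google analytics", 8), ("mixpanel", 8), ("amplitude", 8), ("segment", 136),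
    ("stripe", 16),
    ("intercom", 32), ("zendesk", 32), ("drift", 32),
    ("sentry", 64), ("datadog", 64),
    ("hubspot", 128),
    ("wordpress", 256), ("wix", 256) ]

def pvMask : PySem.Dict String Nat := PySem.Dict.mk pvMaskL

def pvPoints : List Int := [20, 15, 10, 10, 10, 10, 10, 10]

-- Transliteration of B: fold OR-ing masks over the dict's keys; 'fired >> i & 1' as a
-- truth value is exactly Nat.testBit fired i (all masks are nonnegative).
def calculate_tech_score_py_alt (techs : List (String × String)) : Int :=
  let fired : Nat := techs.foldl (fun m p => m ||| (pvMask.getD p.1 0)) 0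
  let score : Int :=
    (((PySem.List.enumerate pvPoints).filter (fun ip => Nat.testBit fired ip.1.toNat)).map (fun ip => ip.2)).sum
  let score := if !(Nat.testBit fired 8) then score + 5 else score
  min score 100

-- ===== PRECONDITION & SPEC =====
def Spec_calculate_tech_score_py (techs : List (String × String)) (out : Int) : Prop := out = calculate_tech_score_py_alt techs
instance (techs : List (String × String)) (out : Int) : Decidable (Spec_calculate_tech_score_py techs out) := by unfold Spec_calculate_tech_score_py; infer_instance

-- ===== CLAIM (what is proved, stated in full; the proofs are below) =====
def Claim_equal_calculate_tech_score_py : Prop := ∀ (techs : List (String × String)), Dom_calculate_tech_score_py techs → Spec_calculate_tech_score_py techs (calculate_tech_score_py techs)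

-- ===== LEMMAS AND PROOFS =====

-- Bit i of the OR-fold is: some tech's mask has bit i set.
theorem testBit_foldl_or (techs : List (String × String)) (m0 : Nat) (i : Nat) :
    Nat.testBit (techs.foldl (fun m p => m ||| (pvMask.getD p.1 0)) m0) i
      = (Nat.testBit m0 i || techs.any (fun p => Nat.testBit (pvMask.getD p.1 0) i)) := by
  induction techs generalizing m0 with
  | nil => simp
  | cons p rest ih =>
      simp [List.foldl_cons, List.any_cons, ih, Nat.testBit_or, Bool.or_assoc]

-- A list's any of a disjunction splits.
theorem any_or_split {α : Type} (l : List α) (f g : α → Bool) :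
    l.any (fun x => f x || g x) = (l.any f || l.any g) := by
  induction l with
  | nil => simp
  | cons x xs ih =>
      simp only [List.any_cons, ih]
      cases f x <;> cases g x <;> simp

-- Bit i of a literal dict lookup, as a scan of the entries whose value has bit i.
theorem getD_mk_testBit (kvs : List (String × Nat)) (hnd : (kvs.map Prod.fst).Nodup)
    (s : String) (i : Nat) :
    Nat.testBit ((PySem.Dict.mk kvs).getD s 0) i
      = (kvs.filter (fun kv => Nat.testBit kv.2 i)).any (fun kv => kv.1 == s) := by
  induction kvs with
  | nil => simp [PySem.Dict.getD, PySem.Dict.get?]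
  | cons kv rest ih =>
      rcases kv with ⟨k, v⟩
      simp only [List.map_cons, List.nodup_cons] at hnd
      rw [PySem.Dict.getD_eq_get?_getD, PySem.Dict.get?_mk_cons]
      simp only [List.filter_cons]
      by_cases h : (k == s) = true
      · have hs : k = s := by simpa using h
        subst hs
        have hrest : ((rest.filter (fun kv => Nat.testBit kv.2 i)).any (fun kv => kv.1 == k)) = false := by
          simp only [List.any_eq_false]
          intro kv hkv
          have hmem := List.mem_of_mem_filter hkv
          have : kv.1 ≠ k := by
            intro he
            exact hnd.1 (he ▸ List.mem_map_of_mem hmem)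
          simpa using this
        by_cases hb : Nat.testBit v i = true
        · simp [h, hb, hrest]
        · simp only [Bool.not_eq_true] at hb
          simp [h, hb, hrest]
      · have h' : (k == s) = false := by simpa using h
        rw [if_neg (by simp [h'])]
        rw [← PySem.Dict.getD_eq_get?_getD]
        rw [ih hnd.2]
        by_cases hb : Nat.testBit v i = true
        · simp [hb, List.any_cons, h']
        · simp only [Bool.not_eq_true] at hb
          simp [hb]

-- String `==` is symmetric.
theorem str_beq_flip (a b : String) : (a == b) = (b == a) := by
  by_cases h : a = b
  · subst h; rfl
  · have h2 : ¬ b = a := fun e => h e.symm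
    simp [h, h2]

-- A's body abstracted over its nine boolean conditions (proof helper).
def score9 (c1 c2 c3 c4 c5 c6 c7 c8 c9 : Bool) : Int :=
  let score : Int := 0
  let score := if c1 then score + 20 else score
  let score := if c2 then score + 15 else score
  let score := if c3 then score + 10 else score
  let score := if c4 then score + 10 else score
  let score := if c5 then score + 10 else score
  let score := if c6 then score + 10 else score
  let score := if c7 then score + 10 else score
  let score := if c8 then score + 10 else score
  let score := if c9 then score + 5 else score
  min score 100

theorem bit_eq_0 (techs : List (String × String)) :
    Nat.testBit (techs.foldl (fun m p => m ||| (pvMask.getD p.1 0)) 0) 0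
      = (pyHasKey techs "react" || pyHasKey techs "vue" || pyHasKey techs "angular" || pyHasKey techs "svelte" || pyHasKey techs "next.js") := by
  rw [testBit_foldl_or]
  simp only [Nat.zero_testBit, Bool.false_or, pvMask, getD_mk_testBit pvMaskL (by decide)]
  simp only [show pvMaskL.filter (fun kv => Nat.testBit kv.2 0) = [("react",1),("vue",1),("angular",1),("svelte",1),("next.js",1)] from by decide]
  simp only [List.any_cons, List.any_nil, Bool.or_false, any_or_split, str_beq_flip,
    pyHasKey, Bool.or_assoc]

theorem bit_eq_1 (techs : List (String × String)) :
    Nat.testBit (techs.foldl (fun m p => m ||| (pvMask.getD p.1 0)) 0) 1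
      = (pyHasKey techs "aws" || pyHasKey techs "google cloud" || pyHasKey techs "azure" || pyHasKey techs "vercel") := by
  rw [testBit_foldl_or]
  simp only [Nat.zero_testBit, Bool.false_or, pvMask, getD_mk_testBit pvMaskL (by decide)]
  simp only [show pvMaskL.filter (fun kv => Nat.testBit kv.2 1) = [("aws",2),("google cloud",2),("azure",2),("vercel",2)] from by decide]
  simp only [List.any_cons, List.any_nil, Bool.or_false, any_or_split, str_beq_flip,
    pyHasKey, Bool.or_assoc]

theorem bit_eq_2 (techs : List (String × String)) :
    Nat.testBit (techs.foldl (fun m p => m ||| (pvMask.getD p.1 0)) 0) 2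
      = (pyHasKey techs "cloudflare" || pyHasKey techs "fastly" || pyHasKey techs "akamai" || pyHasKey techs "cloudfront") := by
  rw [testBit_foldl_or]
  simp only [Nat.zero_testBit, Bool.false_or, pvMask, getD_mk_testBit pvMaskL (by decide)]
  simp only [show pvMaskL.filter (fun kv => Nat.testBit kv.2 2) = [("cloudflare",4),("fastly",4),("akamai",4),("cloudfront",4)] from by decide]
  simp only [List.any_cons, List.any_nil, Bool.or_false, any_or_split, str_beq_flip,
    pyHasKey, Bool.or_assoc]

theorem bit_eq_3 (techs : List (String × String)) :
    Nat.testBit (techs.foldl (fun m p => m ||| (pvMask.getD p.1 0)) 0) 3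
      = (pyHasKey techs "google analytics" || pyHasKey techs "mixpanel" || pyHasKey techs "amplitude" || pyHasKey techs "segment") := by
  rw [testBit_foldl_or]
  simp only [Nat.zero_testBit, Bool.false_or, pvMask, getD_mk_testBit pvMaskL (by decide)]
  simp only [show pvMaskL.filter (fun kv => Nat.testBit kv.2 3) = [("google analytics",8),("mixpanel",8),("amplitude",8),("segment",136)] from by decide]
  simp only [List.any_cons, List.any_nil, Bool.or_false, any_or_split, str_beq_flip,
    pyHasKey, Bool.or_assoc]

theorem bit_eq_4 (techs : List (String × String)) :
    Nat.testBit (techs.foldl (fun m p => m ||| (pvMask.getD p.1 0)) 0) 4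
      = (pyHasKey techs "stripe") := by
  rw [testBit_foldl_or]
  simp only [Nat.zero_testBit, Bool.false_or, pvMask, getD_mk_testBit pvMaskL (by decide)]
  simp only [show pvMaskL.filter (fun kv => Nat.testBit kv.2 4) = [("stripe",16)] from by decide]
  simp only [List.any_cons, List.any_nil, Bool.or_false, any_or_split, str_beq_flip,
    pyHasKey, Bool.or_assoc]

theorem bit_eq_5 (techs : List (String × String)) :
    Nat.testBit (techs.foldl (fun m p => m ||| (pvMask.getD p.1 0)) 0) 5
      = (pyHasKey techs "intercom" || pyHasKey techs "zendesk" || pyHasKey techs "drift") := by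
  rw [testBit_foldl_or]
  simp only [Nat.zero_testBit, Bool.false_or, pvMask, getD_mk_testBit pvMaskL (by decide)]
  simp only [show pvMaskL.filter (fun kv => Nat.testBit kv.2 5) = [("intercom",32),("zendesk",32),("drift",32)] from by decide]
  simp only [List.any_cons, List.any_nil, Bool.or_false, any_or_split, str_beq_flip,
    pyHasKey, Bool.or_assoc]

theorem bit_eq_6 (techs : List (String × String)) :
    Nat.testBit (techs.foldl (fun m p => m ||| (pvMask.getD p.1 0)) 0) 6
      = (pyHasKey techs "sentry" || pyHasKey techs "datadog") := by
  rw [testBit_foldl_or]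
  simp only [Nat.zero_testBit, Bool.false_or, pvMask, getD_mk_testBit pvMaskL (by decide)]
  simp only [show pvMaskL.filter (fun kv => Nat.testBit kv.2 6) = [("sentry",64),("datadog",64)] from by decide]
  simp only [List.any_cons, List.any_nil, Bool.or_false, any_or_split, str_beq_flip,
    pyHasKey, Bool.or_assoc]

theorem bit_eq_7 (techs : List (String × String)) :
    Nat.testBit (techs.foldl (fun m p => m ||| (pvMask.getD p.1 0)) 0) 7
      = (pyHasKey techs "segment" || pyHasKey techs "hubspot") := by
  rw [testBit_foldl_or]
  simp only [Nat.zero_testBit, Bool.false_or, pvMask, getD_mk_testBit pvMaskL (by decide)]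
  simp only [show pvMaskL.filter (fun kv => Nat.testBit kv.2 7) = [("segment",136),("hubspot",128)] from by decide]
  simp only [List.any_cons, List.any_nil, Bool.or_false, any_or_split, str_beq_flip,
    pyHasKey, Bool.or_assoc]

theorem bit_eq_8 (techs : List (String × String)) :
    Nat.testBit (techs.foldl (fun m p => m ||| (pvMask.getD p.1 0)) 0) 8
      = (pyHasKey techs "wordpress" || pyHasKey techs "wix") := by
  rw [testBit_foldl_or]
  simp only [Nat.zero_testBit, Bool.false_or, pvMask, getD_mk_testBit pvMaskL (by decide)]
  simp only [show pvMaskL.filter (fun kv => Nat.testBit kv.2 8) = [("wordpress",256),("wix",256)] from by decide]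
  simp only [List.any_cons, List.any_nil, Bool.or_false, any_or_split, str_beq_flip,
    pyHasKey, Bool.or_assoc]

-- ===== VERDICT (by name: the statement is the Claim_ definition above) =====
set_option maxHeartbeats 1000000 in
theorem calculate_tech_score_py_spec : Claim_equal_calculate_tech_score_py := by
  intro techs _
  unfold Spec_calculate_tech_score_py
  rw [show calculate_tech_score_py techs = score9
    (["react", "vue", "angular", "svelte", "next.js"].any (fun t => pyHasKey techs t))
    (["aws", "google cloud", "azure", "vercel"].any (fun t => pyHasKey techs t))
    (["cloudflare", "fastly", "akamai", "cloudfront"].any (fun t => pyHasKey techs t))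
    (["google analytics", "mixpanel", "amplitude", "segment"].any (fun t => pyHasKey techs t))
    (pyHasKey techs "stripe")
    (["intercom", "zendesk", "drift"].any (fun t => pyHasKey techs t))
    (["sentry", "datadog"].any (fun t => pyHasKey techs t))
    (["hubspot", "segment"].any (fun t => pyHasKey techs t))
    (!pyHasKey techs "wordpress" && !pyHasKey techs "wix") from rfl]
  unfold calculate_tech_score_py_alt
  simp only [PySem.List.enumerate_cons, PySem.List.enumerate_nil, pvPoints,
    List.filter_cons, List.filter_nil,
    show ((0:Int)).toNat = 0 from rfl, show ((0:Int)+1).toNat = 1 from rfl,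
    show ((0:Int)+1+1).toNat = 2 from rfl, show ((0:Int)+1+1+1).toNat = 3 from rfl,
    show ((0:Int)+1+1+1+1).toNat = 4 from rfl, show ((0:Int)+1+1+1+1+1).toNat = 5 from rfl,
    show ((0:Int)+1+1+1+1+1+1).toNat = 6 from rfl, show ((0:Int)+1+1+1+1+1+1+1).toNat = 7 from rfl]
  simp only [bit_eq_0, bit_eq_1, bit_eq_2, bit_eq_3, bit_eq_4, bit_eq_5, bit_eq_6, bit_eq_7, bit_eq_8]
  simp only [score9, List.any_cons, List.any_nil, Bool.or_false, Bool.or_assoc]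
  generalize pyHasKey techs "react" = r1
  generalize pyHasKey techs "vue" = r2
  generalize pyHasKey techs "angular" = r3
  generalize pyHasKey techs "svelte" = r4
  generalize pyHasKey techs "next.js" = r5
  generalize pyHasKey techs "aws" = w1
  generalize pyHasKey techs "google cloud" = w2
  generalize pyHasKey techs "azure" = w3
  generalize pyHasKey techs "vercel" = w4
  generalize pyHasKey techs "cloudflare" = d1
  generalize pyHasKey techs "fastly" = d2
  generalize pyHasKey techs "akamai" = d3
  generalize pyHasKey techs "cloudfront" = d4
  generalize pyHasKey techs "google analytics" = g1
  generalize pyHasKey techs "mixpanel" = g2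
  generalize pyHasKey techs "amplitude" = g3
  generalize pyHasKey techs "segment" = g4
  generalize pyHasKey techs "stripe" = st
  generalize pyHasKey techs "intercom" = i1
  generalize pyHasKey techs "zendesk" = i2
  generalize pyHasKey techs "drift" = i3
  generalize pyHasKey techs "sentry" = m1
  generalize pyHasKey techs "datadog" = m2
  generalize pyHasKey techs "hubspot" = h1
  generalize pyHasKey techs "wordpress" = cw
  generalize pyHasKey techs "wix" = cx
  generalize (r1 || (r2 || (r3 || (r4 || r5)))) = a1
  generalize (w1 || (w2 || (w3 || w4))) = a2
  generalize (d1 || (d2 || (d3 || d4))) = a3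
  generalize (g1 || (g2 || (g3 || g4))) = a4
  generalize (i1 || (i2 || i3)) = a6
  generalize (m1 || m2) = a7
  revert a1 a2 a3 a4 st a6 a7 cw cx g4 h1
  decide
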